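-- pv_equiv track=rewrite | github.com/tolstoydigital/TEI | utils/taxonomy_front_utils.py | remove_vse_prosto_ana_for_bibllist
-- ===== SOURCE A (Python) =====
-- def remove_vse_prosto_ana_for_bibllist(ana: list[str]) -> list[str]:
--     new_ana = ana.copy()
--     for catref in ana:
--         if catref.endswith('_np'):
--             try:
--                 new_ana.remove(catref.rstrip('np').rstrip('_'))
--             except ValueError:
--                 pass
--     return new_ana
-- ===== SOURCE B (Python) =====
-- def remove_vse_prosto_ana_for_bibllist(ana: list[str]) -> list[str]:
--     # one pass counting removal quotas per base, one pass rebuilding the list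
--     quota = {}
--     for s in ana:
--         if s.endswith('_np'):
--             b = s.rstrip('np').rstrip('_')
--             quota[b] = quota.get(b, 0) + 1
--     out = []
--     for s in ana:
--         k = quota.get(s, 0)
--         if k > 0:
--             quota[s] = k - 1
--         else:
--             out.append(s)
--     return out
-- ===== Notes on version B (the rewrite author's own statement) =====
-- stated objective: alternative
-- what changed: Instead of calling list.remove (a linear scan) once per '_np' element, B counts removal quotas per base value in a dict in one pass and rebuilds the list in a second pass, skipping the first k occurrences of each base; this avoids A's quadratic worst case, though on inputs with few '_np' elements both are linear.
import Mathlib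
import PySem

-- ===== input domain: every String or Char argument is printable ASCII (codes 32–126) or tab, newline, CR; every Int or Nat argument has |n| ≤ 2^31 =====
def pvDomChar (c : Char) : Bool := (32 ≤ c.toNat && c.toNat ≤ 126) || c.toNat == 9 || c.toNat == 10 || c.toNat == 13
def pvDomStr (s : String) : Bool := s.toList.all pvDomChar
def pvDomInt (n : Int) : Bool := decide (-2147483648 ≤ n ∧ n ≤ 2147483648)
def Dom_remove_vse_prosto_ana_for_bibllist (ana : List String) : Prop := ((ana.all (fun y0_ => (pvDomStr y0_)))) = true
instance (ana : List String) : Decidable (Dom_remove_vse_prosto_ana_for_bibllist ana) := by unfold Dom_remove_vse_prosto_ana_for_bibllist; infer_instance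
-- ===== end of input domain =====

-- B counts removal quotas per base value in a dict (one pass) and rebuilds the
-- list in a second pass skipping the first k occurrences of each base, instead
-- of A's list.remove scan per '_np' element.

-- s.rstrip(chars): drop from the right every char contained in chars.
-- Exact port of Python str.rstrip with an argument (PySem.Str.rstrip is the no-argument form).
def pvRstripChars (s : String) (chars : String) : String :=
  String.ofList ((s.toList.reverse.dropWhile (fun c => chars.toList.contains c)).reverse)

-- catref.rstrip('np').rstrip('_'), the identical expression both Pythons contain
def pvBase (s : String) : String :=
  pvRstripChars (pvRstripChars s "np") "_"

-- ===== PORT A =====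
def remove_vse_prosto_ana_for_bibllist (ana : List String) : List String :=
  -- new_ana = ana.copy(); for catref in ana: …; return new_ana
  ana.foldl (fun new_ana catref =>
    if PySem.Str.endswith catref "_np" then
      match PySem.List.remove? new_ana (pvBase catref) with
      | some l => l      -- new_ana.remove(...)
      | none => new_ana  -- except ValueError: pass
    else new_ana) ana

-- ===== PORT B =====
def remove_vse_prosto_ana_for_bibllist_alt (ana : List String) : List String :=
  -- quota = {}; for s in ana: if s.endswith('_np'): quota[b] = quota.get(b,0)+1
  let quota : PySem.Dict String Int :=
    ana.foldl (fun q s =>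
      if PySem.Str.endswith s "_np" then
        let b := pvBase s
        q.insert b (q.getD b 0 + 1)
      else q) PySem.Dict.empty
  -- out = []; for s in ana: k = quota.get(s,0); if k>0: quota[s]=k-1 else out.append(s)
  (ana.foldl (fun (st : PySem.Dict String Int × List String) s =>
      let k := st.1.getD s 0
      if k > 0 then (st.1.insert s (k - 1), st.2)
      else (st.1, st.2 ++ [s])) (quota, [])).2

-- ===== PRECONDITION & SPEC =====
def Spec_remove_vse_prosto_ana_for_bibllist (ana : List String) (out : List String) : Prop := out = remove_vse_prosto_ana_for_bibllist_alt ana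
instance (ana : List String) (out : List String) : Decidable (Spec_remove_vse_prosto_ana_for_bibllist ana out) := by unfold Spec_remove_vse_prosto_ana_for_bibllist; infer_instance

-- ===== CLAIM (what is proved, stated in full; the proofs are below) =====
def Claim_equal_remove_vse_prosto_ana_for_bibllist : Prop := ∀ (ana : List String), Dom_remove_vse_prosto_ana_for_bibllist ana → Spec_remove_vse_prosto_ana_for_bibllist ana (remove_vse_prosto_ana_for_bibllist ana)


-- ===== LEMMAS AND PROOFS =====

-- the list of bases of the '_np' elements, in order
def pvBases (ana : List String) : List String :=
  (ana.filter (fun s => PySem.Str.endswith s "_np")).map pvBase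

-- pure model of B's second pass: skip an element while its quota is positive
def pvSkip (q : String → Int) : List String → List String
  | [] => []
  | x :: l => if q x > 0 then pvSkip (fun s => if s = x then q x - 1 else q s) l
              else x :: pvSkip q l

-- A guarded fold is the fold over the filtered-and-mapped list
theorem foldl_if_filter_map {α : Type} (p : String → Bool) (b : String → String)
    (g : α → String → α) (l : List String) (init : α) :
    l.foldl (fun a c => if p c then g a (b c) else a) init
      = ((l.filter p).map b).foldl g init := by
  induction l generalizing init with
  | nil => rfl
  | cons x l ih =>
      by_cases h : p x = true <;> simp [List.foldl, h, ih]

theorem pvSkip_congr (q q' : String → Int) (h : ∀ x, q x = q' x) (l : List String) :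
    pvSkip q l = pvSkip q' l := by
  induction l generalizing q q' with
  | nil => rfl
  | cons x l ih =>
      simp only [pvSkip, h]
      split
      · exact ih _ _ (fun s => by by_cases hs : s = x <;> simp [hs, h])
      · rw [ih _ _ h]

theorem pvSkip_zero (q : String → Int) (h : ∀ x, q x ≤ 0) (l : List String) :
    pvSkip q l = l := by
  induction l with
  | nil => rfl
  | cons x l ih => simp [pvSkip, not_lt.mpr (h x), ih]

-- incrementing b's quota = removing the first occurrence of b beforehand
theorem pvSkip_remove (b : String) (l : List String) :
    ∀ q : String → Int, (∀ x, 0 ≤ q x) →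
    pvSkip (fun x => if x = b then q x + 1 else q x) l
      = pvSkip q ((PySem.List.remove? l b).getD l) := by
  induction l with
  | nil => intro q hq; rfl
  | cons x l ih =>
      intro q hq
      by_cases hx : x = b
      · subst hx
        have h1 : (0 : Int) < q x + 1 := by have := hq x; omega
        simp only [pvSkip, PySem.List.remove?_cons_self, Option.getD_some,
          eq_self_iff_true, if_true]
        rw [if_pos h1]
        exact pvSkip_congr _ _ (fun s => by by_cases hs : s = x <;> simp [hs]) l
      · have hrem : (PySem.List.remove? (x :: l) b).getD (x :: l)
            = x :: (PySem.List.remove? l b).getD l := by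
          rw [PySem.List.remove?_cons_of_ne l hx]
          cases PySem.List.remove? l b <;> simp
        rw [hrem]
        simp only [pvSkip, if_neg hx]
        by_cases hk : q x > 0
        · rw [if_pos hk, if_pos hk]
          have hq' : ∀ s, 0 ≤ (fun s => if s = x then q x - 1 else q s) s := by
            intro s
            by_cases hs : s = x
            · simp only [hs, if_true, eq_self_iff_true]; omega
            · simp only [if_neg hs]; exact hq s
          rw [← ih (fun s => if s = x then q x - 1 else q s) hq']
          exact pvSkip_congr _ _
            (fun s => by by_cases hs : s = x <;> by_cases hb : s = b <;> simp_all) l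
        · rw [if_neg hk, if_neg hk, ih q hq]

-- core: sequentially removing each base = skipping with the bases' counts
theorem removeSeq_eq_skip (bs : List String) : ∀ l : List String,
    bs.foldl (fun l b => (PySem.List.remove? l b).getD l) l
      = pvSkip (fun x => (bs.count x : Int)) l := by
  induction bs with
  | nil => intro l; exact (pvSkip_zero _ (fun x => by simp) l).symm
  | cons b bs ih =>
      intro l
      rw [List.foldl_cons, ih]
      rw [← pvSkip_remove b l (fun x => (bs.count x : Int)) (fun x => by positivity)]
      refine pvSkip_congr _ _ (fun x => ?_) l
      by_cases hx : x = b
      · subst hx; simp [List.count_cons]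
      · simp [List.count_cons, hx, Ne.symm hx]

-- B's second fold computes pvSkip of the dict's quota function
theorem foldl_skip (l : List String) : ∀ (d : PySem.Dict String Int) (acc : List String),
    (l.foldl (fun (st : PySem.Dict String Int × List String) s =>
        let k := st.1.getD s 0
        if k > 0 then (st.1.insert s (k - 1), st.2)
        else (st.1, st.2 ++ [s])) (d, acc)).2
      = acc ++ pvSkip (fun s => d.getD s 0) l := by
  induction l with
  | nil => intro d acc; simp [pvSkip]
  | cons x l ih =>
      intro d acc
      simp only [List.foldl_cons, pvSkip]
      by_cases hk : d.getD x 0 > 0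
      · simp only [if_pos hk, ih]
        congr 1
        exact pvSkip_congr _ _ (fun s => by rw [PySem.Dict.getD_insert]) l
      · simp only [if_neg hk, ih, List.append_assoc, List.singleton_append]

-- the quota dict built by B's first pass counts the bases
theorem quota_getD (ana : List String) (v : String) :
    (ana.foldl (fun q s =>
      if PySem.Str.endswith s "_np" then
        let b := pvBase s
        q.insert b (q.getD b 0 + 1)
      else q) PySem.Dict.empty).getD v 0 = ((pvBases ana).count v : Int) := by
  have h1 : (ana.foldl (fun (q : PySem.Dict String Int) s =>
      if PySem.Str.endswith s "_np" then
        q.insert (pvBase s) (q.getD (pvBase s) 0 + 1)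
      else q) PySem.Dict.empty)
      = (pvBases ana).foldl (fun q b => q.insert b (q.getD b 0 + 1)) PySem.Dict.empty :=
    foldl_if_filter_map (fun s => PySem.Str.endswith s "_np") pvBase
      (fun (q : PySem.Dict String Int) b => q.insert b (q.getD b 0 + 1)) ana PySem.Dict.empty
  show (ana.foldl (fun (q : PySem.Dict String Int) s =>
      if PySem.Str.endswith s "_np" then
        q.insert (pvBase s) (q.getD (pvBase s) 0 + 1)
      else q) PySem.Dict.empty).getD v 0 = _
  rw [h1, PySem.Dict.getD_foldl_insert_add_one]
  simp

-- ===== VERDICT (by name: the statement is the Claim_ definition above) =====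
theorem remove_vse_prosto_ana_for_bibllist_spec : Claim_equal_remove_vse_prosto_ana_for_bibllist := by
  intro ana _
  show remove_vse_prosto_ana_for_bibllist ana = remove_vse_prosto_ana_for_bibllist_alt ana
  have hA : remove_vse_prosto_ana_for_bibllist ana
      = pvSkip (fun s => ((pvBases ana).count s : Int)) ana := by
    have hstep : (fun (new_ana : List String) catref =>
        if PySem.Str.endswith catref "_np" then
          match PySem.List.remove? new_ana (pvBase catref) with
          | some l => l
          | none => new_ana
        else new_ana)
      = (fun (new_ana : List String) catref =>
          if PySem.Str.endswith catref "_np" then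
            (PySem.List.remove? new_ana (pvBase catref)).getD new_ana
          else new_ana) := by
      funext a c
      by_cases hc : PySem.Str.endswith c "_np"
      · simp only [if_pos hc]
        cases h : PySem.List.remove? a (pvBase c) <;> simp [h]
      · simp only [if_neg hc]
    have h1 : (ana.foldl (fun (new_ana : List String) catref =>
        if PySem.Str.endswith catref "_np" then
          (PySem.List.remove? new_ana (pvBase catref)).getD new_ana
        else new_ana) ana)
        = (pvBases ana).foldl (fun l b => (PySem.List.remove? l b).getD l) ana :=
      foldl_if_filter_map (fun s => PySem.Str.endswith s "_np") pvBase
        (fun (l : List String) b => (PySem.List.remove? l b).getD l) ana ana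
    unfold remove_vse_prosto_ana_for_bibllist
    rw [hstep, h1, removeSeq_eq_skip]
  have hB : remove_vse_prosto_ana_for_bibllist_alt ana
      = pvSkip (fun s => ((pvBases ana).count s : Int)) ana := by
    show (ana.foldl (fun (st : PySem.Dict String Int × List String) s =>
        let k := st.1.getD s 0
        if k > 0 then (st.1.insert s (k - 1), st.2)
        else (st.1, st.2 ++ [s]))
        (ana.foldl (fun q s =>
          if PySem.Str.endswith s "_np" then
            let b := pvBase s
            q.insert b (q.getD b 0 + 1)
          else q) PySem.Dict.empty, ([] : List String))).2 = _
    rw [foldl_skip]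
    simp only [List.nil_append]
    exact pvSkip_congr _ _ (fun s => quota_getD ana s) ana
  rw [hA, hB]
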